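-- pv_equiv track=rewrite | github.com/rabumaabraham/DSA-UC-San-Diego | bubble_detection.py | count_bubbles
-- ===== SOURCE A (Python) =====
-- from collections import defaultdict
-- import itertools
--
-- def find_disjoint_paths(graph, start, end, max_length):
--     """Find all disjoint paths between start and end with length <= max_length"""
--     paths = []
--
--     def dfs(current, path, visited):
--         if current == end and len(path) > 1:
--             paths.append(path[:])
--             return
--
--         if len(path) > max_length:
--             return
--
--         for neighbor in graph.get(current, []):
--             if neighbor not in visited:
--                 path.append(neighbor)
--                 visited.add(neighbor)
--                 dfs(neighbor, path, visited)
--                 path.pop()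
--                 visited.remove(neighbor)
--
--     dfs(start, [start], {start})
--     return paths
--
-- def paths_disjoint(path1, path2):
--     """Check if two paths are disjoint (only share start and end)"""
--     set1 = set(path1)
--     set2 = set(path2)
--     intersection = set1 & set2
--     return len(intersection) == 2  # Only start and end vertices
--
-- def count_bubbles(graph, t):
--     """Count the number of bubbles in the graph"""
--     bubbles = 0
--     paths_dict = defaultdict(list)
--
--     # Find all vertices with multiple outgoing edges
--     sources = [v for v, neighbors in graph.items() if len(neighbors) > 1]
--
--     for source in sources:
--         # Find all possible targets (vertices with multiple incoming edges)
--         targets = [v for v in graph if v != source and len([u for u in graph if v in graph[u]]) > 1]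
--
--         for target in targets:
--             # Find all paths from source to target
--             paths = find_disjoint_paths(graph, source, target, t)
--
--             if len(paths) >= 2:
--                 # Check all pairs of paths for disjointness
--                 for path1, path2 in itertools.combinations(paths, 2):
--                     if paths_disjoint(path1, path2):
--                         bubbles += 1
--
--     return bubbles
-- ===== SOURCE B (Python) =====
-- def count_bubbles(graph, t):
--     """Count the number of bubbles in the graph"""
--     bubbles = 0
--     for source, nbrs in graph.items():
--         if len(nbrs) <= 1:
--             continue
--         for target in graph:
--             if target == source:
--                 continue
--             if sum(1 for u in graph if target in graph[u]) < 2: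
--                 continue
--             # enumerate simple paths source -> target with an explicit stack machine
--             paths = []
--             stack = [(source, [source], {source})]
--             while stack:
--                 cur, path, vis = stack.pop()
--                 if cur == target and len(path) > 1:
--                     paths.append(path)
--                     continue
--                 if len(path) > t:
--                     continue
--                 for nb in reversed(graph.get(cur, [])):
--                     if nb not in vis:
--                         stack.append((nb, path + [nb], vis | {nb}))
--             # count disjoint unordered pairs by popping the front and scanning the rest
--             rest = paths
--             while rest:
--                 p1 = rest.pop(0)
--                 for p2 in rest:
--                     if len(set(p1) & set(p2)) == 2:
--                         bubbles += 1
--     return bubbles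
-- ===== Notes on version B (the rewrite author's own statement) =====
-- stated objective: alternative
-- what changed: The recursive nested-closure DFS is replaced by an explicit stack machine over (vertex, path, visited) states, the comprehension-built source/target lists by continue-style filtering with an inline indegree sum, and itertools.combinations by a pop-front-and-scan pair-counting loop.
import Mathlib
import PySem

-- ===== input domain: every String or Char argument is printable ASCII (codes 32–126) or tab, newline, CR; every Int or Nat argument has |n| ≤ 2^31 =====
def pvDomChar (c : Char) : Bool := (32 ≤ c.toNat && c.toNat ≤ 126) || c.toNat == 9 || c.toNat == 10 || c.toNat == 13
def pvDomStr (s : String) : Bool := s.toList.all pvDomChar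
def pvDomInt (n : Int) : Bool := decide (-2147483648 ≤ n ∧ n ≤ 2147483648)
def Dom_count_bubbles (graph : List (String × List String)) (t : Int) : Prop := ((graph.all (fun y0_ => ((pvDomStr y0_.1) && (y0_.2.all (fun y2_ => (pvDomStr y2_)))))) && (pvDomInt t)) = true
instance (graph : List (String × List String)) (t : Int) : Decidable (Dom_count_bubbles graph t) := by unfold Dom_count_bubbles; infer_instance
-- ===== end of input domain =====

-- B replaces A's recursive nested-closure DFS by an explicit stack machine over
-- (vertex, path, visited) states and counts disjoint pairs by a pop-and-scan loop
-- instead of itertools.combinations (objective: alternative decomposition, same cost).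

-- ===== PORT A =====

-- paths_disjoint(path1, path2): len(set(path1) & set(path2)) == 2
def paths_disjoint (p1 p2 : List String) : Bool :=
  (PySem.Set.inter (PySem.Set.ofList p1) (PySem.Set.ofList p2)).length == 2

-- the nested 'dfs' closure of find_disjoint_paths; 'paths' is the accumulator list the
-- closure mutates.  'fuel' is the length-derived bound maxLen.toNat + 2 - path.length that
-- makes the recursion structural; the length guard fires before fuel can run out, so the
-- fuel-0 branch is unreachable for the fuel find_disjoint_paths_A supplies.
-- The for-loop over graph.get(current, []) is the mutual helper pvDfsAList.
mutual
def pvDfsA (graph : List (String × List String)) (endv : String) (maxLen : Int)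
    (fuel : Nat) (cur : String) (path : List String) (visited : PySem.Set String)
    (paths : List (List String)) : List (List String) :=
  if cur = endv ∧ 1 < path.length then
    paths ++ [path]
  else if maxLen < (path.length : Int) then
    paths
  else
    match fuel with
    | 0 => paths
    | f + 1 =>
        pvDfsAList graph endv maxLen f ((PySem.Dict.mk graph).getD cur []) path visited paths
termination_by (fuel, 0)
decreasing_by
  rw [Prod.lex_iff]; omega

def pvDfsAList (graph : List (String × List String)) (endv : String) (maxLen : Int)
    (fuel : Nat) (nbrs : List String) (path : List String) (visited : PySem.Set String)
    (paths : List (List String)) : List (List String) :=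
  match nbrs with
  | [] => paths
  | nb :: rest =>
      pvDfsAList graph endv maxLen fuel rest path visited
        (if visited.contains nb then paths
         else pvDfsA graph endv maxLen fuel nb (path ++ [nb]) (visited.add nb) paths)
termination_by (fuel, nbrs.length + 1)
decreasing_by
  all_goals rw [Prod.lex_iff]
  all_goals simp only [List.length_cons]
  all_goals (right; exact ⟨trivial, by omega⟩)
end

-- find_disjoint_paths(graph, start, end, max_length)
def find_disjoint_paths_A (graph : List (String × List String)) (start endv : String)
    (maxLen : Int) : List (List String) :=
  pvDfsA graph endv maxLen (maxLen.toNat + 1) start [start] (PySem.Set.ofList [start]) []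

-- count_bubbles(graph, t), A's shape: comprehensions for sources/targets, then
-- itertools.combinations over the found paths
def count_bubbles (graph : List (String × List String)) (t : Int) : Int :=
  let keys := graph.map (·.1)
  let sources := (graph.filter (fun p => decide (1 < p.2.length))).map (·.1)
  sources.foldl (fun bubbles source =>
    let targets := keys.filter (fun v =>
      decide (v ≠ source ∧ 1 < (keys.filter (fun u => decide (v ∈ (PySem.Dict.mk graph).getD u []))).length))
    targets.foldl (fun bubbles target =>
      let paths := find_disjoint_paths_A graph source target t
      if 2 ≤ paths.length then
        (PySem.List.combinations paths 2).foldl (fun b c =>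
          match c with
          | [p1, p2] => if paths_disjoint p1 p2 then b + 1 else b
          | _ => b) bubbles
      else bubbles) bubbles) 0

-- ===== PORT B =====

-- termination bound for the stack machine: 2 + total adjacency size
def pvW (graph : List (String × List String)) : Nat :=
  (graph.map (fun p => p.2.length)).sum + 2

lemma pvNbrs_len_le (graph : List (String × List String)) (cur : String) :
    ((PySem.Dict.mk graph).getD cur []).length ≤ (graph.map (fun p => p.2.length)).sum := by
  induction graph with
  | nil => simp [PySem.Dict.getD, PySem.Dict.get?]
  | cons p rest ih =>
      obtain ⟨k, v⟩ := p
      rw [PySem.Dict.getD_eq_get?_getD, PySem.Dict.get?_mk_cons]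
      by_cases h : (k == cur) = true
      · simp [h]
      · rw [if_neg h]
        simp only [List.map_cons, List.sum_cons]
        rw [PySem.Dict.getD_eq_get?_getD] at ih
        omega

-- the push loop 'for nb in reversed(...): if nb not in vis: stack.append(...)'
lemma pvPushAll {α β : Type} (q : α → Bool) (f : α → β) :
    ∀ (l : List α) (st : List β),
      l.foldl (fun st x => if q x then st else f x :: st) st
        = (l.reverse.filter (fun x => !q x)).map f ++ st := by
  intro l
  induction l with
  | nil => simp
  | cons x xs ih =>
      intro st
      simp only [List.foldl_cons, List.reverse_cons, List.filter_append, List.map_append, ih]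
      cases hq : q x <;> simp [hq]

lemma pvStackMeasure (graph : List (String × List String)) (maxLen : Int)
    (cur : String) (path : List String) (vis : PySem.Set String)
    (rest : List (String × List String × PySem.Set String))
    (h : ¬ maxLen < (path.length : Int)) :
    ((((PySem.Dict.mk graph).getD cur []).reverse.foldl
        (fun st nb => if vis.contains nb then st else (nb, path ++ [nb], vis.add nb) :: st)
        rest).map (fun s => pvW graph ^ (maxLen.toNat + 2 - s.2.1.length))).sum
      < pvW graph ^ (maxLen.toNat + 2 - path.length)
        + (rest.map (fun s => pvW graph ^ (maxLen.toNat + 2 - s.2.1.length))).sum := by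
  rw [pvPushAll (fun nb => vis.contains nb)
        (fun nb => ((nb, path ++ [nb], vis.add nb) : String × List String × PySem.Set String))]
  rw [List.reverse_reverse, List.map_append, List.sum_append, List.map_map]
  have hlen : path.length ≤ maxLen.toNat := by omega
  set nbrs := (PySem.Dict.mk graph).getD cur [] with hn
  set k := (nbrs.filter (fun x => !vis.contains x)).length with hk
  have hmap : (nbrs.filter (fun x => !vis.contains x)).map
        ((fun s => pvW graph ^ (maxLen.toNat + 2 - s.2.1.length)) ∘
          (fun nb => ((nb, path ++ [nb], vis.add nb) : String × List String × PySem.Set String)))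
      = List.replicate k (pvW graph ^ (maxLen.toNat + 1 - path.length)) := by
    rw [List.eq_replicate_iff]
    constructor
    · simp [hk]
    · intro b hb
      simp only [List.mem_map, Function.comp] at hb
      obtain ⟨nb, _, rfl⟩ := hb
      simp only [List.length_append, List.length_cons, List.length_nil]
      congr 1
      omega
  rw [hmap, List.sum_replicate, smul_eq_mul]
  have hkW : k < pvW graph := by
    have h1 : k ≤ nbrs.length := by rw [hk]; exact List.length_filter_le _ _
    have h2 : nbrs.length ≤ (graph.map (fun p => p.2.length)).sum := pvNbrs_len_le graph cur
    unfold pvW; omega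
  have he : maxLen.toNat + 2 - path.length = (maxLen.toNat + 1 - path.length) + 1 := by omega
  rw [he, pow_succ]
  have hpos : 0 < pvW graph ^ (maxLen.toNat + 1 - path.length) :=
    Nat.pow_pos (by unfold pvW; omega)
  have : k * pvW graph ^ (maxLen.toNat + 1 - path.length)
      < pvW graph ^ (maxLen.toNat + 1 - path.length) * pvW graph := by
    calc k * pvW graph ^ (maxLen.toNat + 1 - path.length)
        < pvW graph * pvW graph ^ (maxLen.toNat + 1 - path.length) :=
          Nat.mul_lt_mul_of_lt_of_le hkW (le_refl _) hpos
      _ = pvW graph ^ (maxLen.toNat + 1 - path.length) * pvW graph := Nat.mul_comm _ _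
  omega

-- the 'while stack:' loop of B
def pvRunStack (graph : List (String × List String)) (endv : String) (maxLen : Int)
    (stack : List (String × List String × PySem.Set String))
    (paths : List (List String)) : List (List String) :=
  match stack with
  | [] => paths
  | (cur, path, vis) :: rest =>
    if cur = endv ∧ 1 < path.length then
      pvRunStack graph endv maxLen rest (paths ++ [path])
    else if _h : maxLen < (path.length : Int) then
      pvRunStack graph endv maxLen rest paths
    else
      pvRunStack graph endv maxLen
        (((PySem.Dict.mk graph).getD cur []).reverse.foldl
          (fun st nb => if vis.contains nb then st else (nb, path ++ [nb], vis.add nb) :: st) rest)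
        paths
termination_by (stack.map (fun s => pvW graph ^ (maxLen.toNat + 2 - s.2.1.length))).sum
decreasing_by
  · have h1 : 1 ≤ pvW graph ^ (maxLen.toNat + 2 - path.length) :=
      Nat.one_le_pow _ _ (by unfold pvW; omega)
    simp only [List.map_cons, List.sum_cons]; omega
  · have h1 : 1 ≤ pvW graph ^ (maxLen.toNat + 2 - path.length) :=
      Nat.one_le_pow _ _ (by unfold pvW; omega)
    simp only [List.map_cons, List.sum_cons]; omega
  · simpa using pvStackMeasure graph maxLen cur path vis rest _h

-- the 'while rest: p1 = rest.pop(0); for p2 in rest: ...' pair-counting loop of B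
def pvCountPairs (paths : List (List String)) (b : Int) : Int :=
  match paths with
  | [] => b
  | p :: rest =>
      pvCountPairs rest
        (rest.foldl (fun b q =>
          if (PySem.Set.inter (PySem.Set.ofList p) (PySem.Set.ofList q)).length == 2
          then b + 1 else b) b)

def count_bubbles_alt (graph : List (String × List String)) (t : Int) : Int :=
  graph.foldl (fun bubbles sp =>
    if sp.2.length ≤ 1 then bubbles
    else
      (graph.map (·.1)).foldl (fun bubbles target =>
        if target = sp.1 then bubbles
        else if ((graph.map (·.1)).foldl
            (fun c u => if target ∈ (PySem.Dict.mk graph).getD u [] then c + 1 else c) (0 : Int)) < 2 then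
          bubbles
        else
          pvCountPairs
            (pvRunStack graph target t [(sp.1, [sp.1], PySem.Set.ofList [sp.1])] [])
            bubbles) bubbles) 0

-- ===== PRECONDITION & SPEC =====
def Spec_count_bubbles (graph : List (String × List String)) (t : Int) (out : Int) : Prop :=
  out = count_bubbles_alt graph t
instance (graph : List (String × List String)) (t : Int) (out : Int) :
    Decidable (Spec_count_bubbles graph t out) := by unfold Spec_count_bubbles; infer_instance

-- ===== CLAIM (what is proved, stated in full; the proofs are below) =====
def Claim_equal_count_bubbles : Prop :=
  ∀ (graph : List (String × List String)) (t : Int),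
    Dom_count_bubbles graph t → Spec_count_bubbles graph t (count_bubbles graph t)

-- ===== LEMMAS AND PROOFS =====


lemma pvDfsA_found (graph : List (String × List String)) (endv : String) (maxLen : Int)
    (fuel : Nat) (cur : String) (path : List String) (vis : PySem.Set String)
    (paths : List (List String)) (h : cur = endv ∧ 1 < path.length) :
    pvDfsA graph endv maxLen fuel cur path vis paths = paths ++ [path] := by
  rw [pvDfsA.eq_def, if_pos h]

lemma pvDfsA_long (graph : List (String × List String)) (endv : String) (maxLen : Int)
    (fuel : Nat) (cur : String) (path : List String) (vis : PySem.Set String)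
    (paths : List (List String)) (h1 : ¬ (cur = endv ∧ 1 < path.length))
    (h2 : maxLen < (path.length : Int)) :
    pvDfsA graph endv maxLen fuel cur path vis paths = paths := by
  rw [pvDfsA.eq_def, if_neg h1, if_pos h2]

lemma pvDfsA_succ (graph : List (String × List String)) (endv : String) (maxLen : Int)
    (f : Nat) (cur : String) (path : List String) (vis : PySem.Set String)
    (paths : List (List String)) (h1 : ¬ (cur = endv ∧ 1 < path.length))
    (h2 : ¬ maxLen < (path.length : Int)) :
    pvDfsA graph endv maxLen (f + 1) cur path vis paths
      = pvDfsAList graph endv maxLen f ((PySem.Dict.mk graph).getD cur []) path vis paths := by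
  rw [pvDfsA.eq_def, if_neg h1, if_neg h2]

lemma dfsAList_eq_foldl (graph : List (String × List String)) (endv : String) (maxLen : Int)
    (f : Nat) (path : List String) (vis : PySem.Set String) :
    ∀ (nbrs : List String) (paths : List (List String)),
      pvDfsAList graph endv maxLen f nbrs path vis paths
        = ((nbrs.filter (fun nb => !vis.contains nb)).map
            (fun nb => ((nb, path ++ [nb], vis.add nb) : String × List String × PySem.Set String))).foldl
            (fun acc s => pvDfsA graph endv maxLen f s.1 s.2.1 s.2.2 acc) paths := by
  intro nbrs
  induction nbrs with
  | nil => intro paths; rw [pvDfsAList]; simp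
  | cons nb rest ih =>
      intro paths
      rw [pvDfsAList]
      cases hc : vis.contains nb
      · have hm : ¬ nb ∈ vis := by simpa using hc
        simp [hm, ih]
      · have hm : nb ∈ vis := by simpa using hc
        simp [hm, ih]

lemma runStack_eq_foldl (graph : List (String × List String)) (endv : String) (maxLen : Int) :
    ∀ (stack : List (String × List String × PySem.Set String)) (paths : List (List String)),
      pvRunStack graph endv maxLen stack paths
        = stack.foldl (fun acc s =>
            pvDfsA graph endv maxLen (maxLen.toNat + 2 - s.2.1.length) s.1 s.2.1 s.2.2 acc) paths := by
  intro stack paths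
  fun_induction pvRunStack graph endv maxLen stack paths with
  | case1 paths => simp
  | case2 paths cur path vis rest hcond ih =>
      rw [List.foldl_cons, ih]
      congr 1
      rw [pvDfsA_found _ _ _ _ _ _ _ _ hcond]
  | case3 paths cur path vis rest hcond hlen ih =>
      rw [List.foldl_cons, ih]
      congr 1
      rw [pvDfsA_long _ _ _ _ _ _ _ _ hcond hlen]
  | case4 paths cur path vis rest hcond hlen ih =>
      simp only [dite_eq_ite] at ih
      rw [ih]
      rw [pvPushAll (fun nb => vis.contains nb)
            (fun nb => ((nb, path ++ [nb], vis.add nb) : String × List String × PySem.Set String)),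
          List.reverse_reverse, List.foldl_append, List.foldl_cons]
      congr 1
      rw [show maxLen.toNat + 2 - path.length = (maxLen.toNat + 1 - path.length) + 1 from by omega,
          pvDfsA_succ _ _ _ _ _ _ _ _ hcond hlen]
      rw [dfsAList_eq_foldl, List.foldl_map, List.foldl_map]
      apply PySem.List.foldl_congr_mem
      intro acc nb _
      rw [show maxLen.toNat + 2 -
            ((nb, path ++ [nb], vis.add nb) : String × List String × PySem.Set String).2.1.length
          = maxLen.toNat + 1 - path.length from by simp only [List.length_append, List.length_cons, List.length_nil]; omega]

lemma combos_eq_countPairs :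
    ∀ (l : List (List String)) (b : Int),
      (PySem.List.combinations l 2).foldl (fun b c =>
          match c with
          | [p1, p2] => if paths_disjoint p1 p2 then b + 1 else b
          | _ => b) b
        = pvCountPairs l b := by
  intro l
  induction l with
  | nil => intro b; rw [pvCountPairs]; simp [PySem.List.combinations_nil_succ]
  | cons x xs ih =>
      intro b
      rw [pvCountPairs]
      rw [show (2 : Nat) = 1 + 1 from rfl, PySem.List.combinations_cons_succ,
        PySem.List.combinations_one]
      rw [List.foldl_append, List.map_map, List.foldl_map, ← ih]
      congr 1

lemma guarded_combos_eq (l : List (List String)) (b : Int) :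
    (if 2 ≤ l.length then
        (PySem.List.combinations l 2).foldl (fun b c =>
          match c with
          | [p1, p2] => if paths_disjoint p1 p2 then b + 1 else b
          | _ => b) b
      else b)
      = pvCountPairs l b := by
  by_cases h : 2 ≤ l.length
  · rw [if_pos h, combos_eq_countPairs]
  · rw [if_neg h]
    match l, h with
    | [], _ => rfl
    | [x], _ => rfl
    | x :: y :: r, h => exact absurd (by simp) h

lemma indeg_eq (keys : List String) (graph : List (String × List String)) (v : String) :
    keys.foldl (fun c u => if v ∈ (PySem.Dict.mk graph).getD u [] then c + 1 else c) (0 : Int)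
      = ((keys.filter (fun u => decide (v ∈ (PySem.Dict.mk graph).getD u []))).length : Int) := by
  rw [PySem.List.foldl_ite_add_one]
  rw [List.countP_eq_length_filter]
  simp

theorem pv_main (graph : List (String × List String)) (t : Int) :
    count_bubbles graph t = count_bubbles_alt graph t := by
  have hpaths : ∀ source target : String,
      pvRunStack graph target t [(source, [source], PySem.Set.ofList [source])] []
        = find_disjoint_paths_A graph source target t := by
    intro source target
    rw [runStack_eq_foldl]
    simp only [List.foldl_cons, List.foldl_nil, List.length_cons, List.length_nil]
    rw [show t.toNat + 2 - (0 + 1) = t.toNat + 1 from by omega]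
    rfl
  unfold count_bubbles count_bubbles_alt
  rw [List.foldl_map]
  rw [← PySem.List.foldl_ite_eq_foldl_filter
        (p := fun p : String × List String => 1 < p.2.length)]
  congr 1
  funext bubbles sp
  by_cases h1 : 1 < sp.2.length
  · rw [if_pos h1, if_neg (by omega)]
    rw [← PySem.List.foldl_ite_eq_foldl_filter
          (p := fun v => v ≠ sp.1 ∧ 1 <
            (List.filter (fun u => decide (v ∈ (PySem.Dict.mk graph).getD u []))
              (List.map (fun x => x.1) graph)).length)]
    congr 1
    funext b target
    by_cases h2 : target = sp.1
    · rw [if_pos h2, if_neg (by simp [h2])]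
    · rw [if_neg h2]
      rw [indeg_eq]
      by_cases h3 : 1 <
          (List.filter (fun u => decide (target ∈ (PySem.Dict.mk graph).getD u []))
            (List.map (fun x => x.1) graph)).length
      · rw [if_pos ⟨h2, h3⟩,
            if_neg (show ¬ (((List.filter (fun u => decide (target ∈ (PySem.Dict.mk graph).getD u []))
              (List.map (fun x => x.1) graph)).length : Int) < 2) from by omega),
            hpaths]
        exact guarded_combos_eq _ _
      · rw [if_neg (by tauto),
            if_pos (show (((List.filter (fun u => decide (target ∈ (PySem.Dict.mk graph).getD u []))
              (List.map (fun x => x.1) graph)).length : Int) < 2) from by omega)]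
  · rw [if_neg h1, if_pos (by omega)]

-- ===== VERDICT (by name: the statement is the Claim_ definition above) =====
theorem count_bubbles_spec : Claim_equal_count_bubbles := by
  intro graph t _
  unfold Spec_count_bubbles
  exact pv_main graph t
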